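-- pv_equiv track=rewrite | github.com/gw-systems/saral-erp-riteshraj | operations/courier/services.py | _normalize_status_token
-- ===== SOURCE A (Python) =====
-- def _normalize_status_token(value: str | None) -> str:
--     token = str(value or "").strip().lower()
--     if not token:
--         return ""
--     for separator in ("-", " ", "/", "."):
--         token = token.replace(separator, "_")
--     while "__" in token:
--         token = token.replace("__", "_")
--     return token.strip("_")
-- ===== SOURCE B (Python) =====
-- def _normalize_status_token(value: str | None) -> str:
--     token = str(value or "").strip().lower()
--     if not token:
--         return ""
--     result = []
--     for ch in token:
--         if ch in "-_ /.":
--             if result and result[-1] != "_":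
--                 result.append("_")
--         else:
--             result.append(ch)
--     return "".join(result).strip("_")
-- ===== Notes on version B (the rewrite author's own statement) =====
-- stated objective: alternative
-- what changed: Instead of four separate replace passes followed by a repeated collapse loop over the whole string, B makes a single left-to-right scan that emits at most one underscore per separator run by tracking the last emitted character; in CPython the C-implemented replace passes of A are still faster in wall-clock terms.
import Mathlib
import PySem

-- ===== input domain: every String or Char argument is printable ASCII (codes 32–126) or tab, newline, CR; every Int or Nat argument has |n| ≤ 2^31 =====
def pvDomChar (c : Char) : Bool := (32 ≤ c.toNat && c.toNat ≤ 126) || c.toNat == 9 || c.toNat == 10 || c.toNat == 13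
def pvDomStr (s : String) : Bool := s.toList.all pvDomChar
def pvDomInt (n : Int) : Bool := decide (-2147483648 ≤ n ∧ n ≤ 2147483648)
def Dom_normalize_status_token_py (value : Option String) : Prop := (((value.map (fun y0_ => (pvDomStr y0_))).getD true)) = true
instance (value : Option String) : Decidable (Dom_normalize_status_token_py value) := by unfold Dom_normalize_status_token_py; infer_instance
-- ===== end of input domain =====

-- B replaces A's four .replace passes plus the repeated '__'-collapse loop by one left-to-right
-- pass that collapses separator runs on the fly; return values are proved equal.

-- ===== PORT A =====
-- helpers for the `while "__" in token:` loop of A; the lemmas are cited by its decreasing_by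
def pvRep1 : List Char → List Char
  | [] => []
  | [c] => [c]
  | c :: d :: t => if c = '_' ∧ d = '_' then '_' :: pvRep1 t else c :: pvRep1 (d :: t)

theorem pvReplaceGo_eq (fuel : Nat) (l acc : List Char) (h : l.length ≤ fuel) :
    PySem.Chars.replace.go ['_', '_'] ['_'] fuel l acc = acc.reverse ++ pvRep1 l := by
  induction fuel generalizing l acc with
  | zero =>
    have hl : l = [] := List.length_eq_zero_iff.mp (Nat.le_zero.mp h)
    subst hl
    rw [PySem.Chars.replace.go.eq_def]
    simp [pvRep1]
  | succ n ih =>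
    rcases l with _ | ⟨c, t⟩
    · rw [PySem.Chars.replace.go.eq_def]; simp [pvRep1]
    · rw [PySem.Chars.replace.go.eq_def]
      simp only []
      by_cases hp : (['_', '_'] : List Char).isPrefixOf (c :: t) = true
      · rcases t with _ | ⟨d, t⟩
        · simp [List.isPrefixOf] at hp
        · simp only [List.isPrefixOf, Bool.and_eq_true, beq_iff_eq] at hp
          obtain ⟨hc, hd, -⟩ := hp
          subst hc; subst hd
          rw [if_pos (by simp [List.isPrefixOf])]
          have ht : t.length ≤ n := by simp at h; omega
          have hdrop : List.drop (['_', '_'] : List Char).length ('_' :: '_' :: t) = t := by simp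
          rw [hdrop, ih _ _ ht]
          simp [pvRep1]
      · rw [if_neg hp]
        have ht : t.length ≤ n := by simp at h; omega
        rw [ih _ _ ht]
        rcases t with _ | ⟨d, t⟩
        · simp [pvRep1]
        · have hnd : ¬(c = '_' ∧ d = '_') := by
            intro ⟨h1, h2⟩; subst h1; subst h2
            simp [List.isPrefixOf] at hp
          simp [pvRep1, hnd]

theorem pvReplace_eq (l : List Char) :
    PySem.Chars.replace l ['_', '_'] ['_'] = pvRep1 l := by
  rw [PySem.Chars.replace]
  simp only [List.isEmpty_cons, Bool.false_eq_true, if_false]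
  simpa using pvReplaceGo_eq l.length l [] le_rfl

theorem pvRep1_length_le (l : List Char) : (pvRep1 l).length ≤ l.length := by
  induction l using pvRep1.induct with
  | case1 => simp [pvRep1]
  | case2 c => simp [pvRep1]
  | case3 c d t hcd ih => simp [pvRep1, hcd] at ih ⊢; omega
  | case4 c d t hcd ih =>
    have h2 : (pvRep1 (d :: t)).length ≤ (d :: t).length := ih
    simp only [pvRep1, if_neg hcd, List.length_cons]
    simp only [List.length_cons] at h2
    omega

theorem pvRep1_length_lt (l : List Char) (h : ['_', '_'] <:+: l) :
    (pvRep1 l).length < l.length := by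
  induction l using pvRep1.induct with
  | case1 => simp at h
  | case2 c => have := h.length_le; simp at this
  | case3 c d t hcd ih =>
    have h2 := pvRep1_length_le t
    simp only [pvRep1, if_pos hcd, List.length_cons]
    omega
  | case4 c d t hcd ih =>
    have h' : ['_', '_'] <:+: d :: t := by
      rcases (List.infix_cons_iff).mp h with hpre | hinf
      · exfalso
        rcases hpre with ⟨r, hr⟩
        simp at hr
        exact hcd ⟨hr.1.symm, hr.2.1.symm⟩
      · exact hinf
    have h2 := ih h'
    simp only [pvRep1, if_neg hcd, List.length_cons]
    simp only [List.length_cons] at h2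
    omega

-- the `while "__" in token: token = token.replace("__", "_")` loop, verbatim
def pvAWhile (s : String) : String :=
  if PySem.Str.isIn "__" s then pvAWhile (PySem.Str.replace s "__" "_") else s
termination_by s.toList.length
decreasing_by
  rename_i hin
  have h1 : (PySem.Str.replace s "__" "_").toList = pvRep1 s.toList := by
    rw [PySem.Str.toList_replace]; exact pvReplace_eq s.toList
  rw [h1]
  apply pvRep1_length_lt
  have := (PySem.Chars.isIn_iff_infix ("__".toList) s.toList).mp (by simpa [PySem.Str.isIn_eq] using hin)
  simpa using this

def normalize_status_token_py (value : Option String) : String :=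
  let token := PySem.Str.lower (PySem.Str.strip (value.getD ""))
  if token = "" then ""
  else
    let token := ["-", " ", "/", "."].foldl (fun t sep => PySem.Str.replace t sep "_") token
    PySem.Str.stripChars (pvAWhile token) "_"

-- ===== PORT B =====
-- one step of B's loop body (`for ch in token: ...`)
def pvStepB (res : List Char) (ch : Char) : List Char :=
  if ch ∈ ['-', '_', ' ', '/', '.'] then
    if res ≠ [] ∧ res.getLast? ≠ some '_' then res ++ ['_'] else res
  else res ++ [ch]

def normalize_status_token_py_alt (value : Option String) : String :=
  let token := PySem.Str.lower (PySem.Str.strip (value.getD ""))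
  if token = "" then ""
  else PySem.Str.stripChars (String.ofList (token.toList.foldl pvStepB [])) "_"

-- ===== PRECONDITION & SPEC =====
def Spec_normalize_status_token_py (value : Option String) (out : String) : Prop := out = normalize_status_token_py_alt value
instance (value : Option String) (out : String) : Decidable (Spec_normalize_status_token_py value out) := by unfold Spec_normalize_status_token_py; infer_instance

-- ===== CLAIM (what is proved, stated in full; the proofs are below) =====
def Claim_equal_normalize_status_token_py : Prop := ∀ (value : Option String), Dom_normalize_status_token_py value → Spec_normalize_status_token_py value (normalize_status_token_py value)

-- ===== LEMMAS AND PROOFS =====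

-- collapse every run of '_' to a single '_'
def pvSqueeze : List Char → List Char
  | [] => []
  | [c] => [c]
  | c :: d :: t => if c = '_' ∧ d = '_' then pvSqueeze (d :: t) else c :: pvSqueeze (d :: t)

-- B's loop once something non-'_' has been emitted, with `prev` the last emitted char
def pvCont (prev : Char) : List Char → List Char
  | [] => []
  | ch :: u =>
      if ch = '_' then
        (if prev = '_' then pvCont prev u else '_' :: pvCont '_' u)
      else ch :: pvCont ch u

def pvMapSep (u : List Char) : List Char :=
  u.map (fun c => if c ∈ (['-', ' ', '/', '.'] : List Char) then '_' else c)

-- single-char replace is a map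
theorem pvReplaceOneGo_eq (a b : Char) (fuel : Nat) (l acc : List Char) (h : l.length ≤ fuel) :
    PySem.Chars.replace.go [a] [b] fuel l acc
      = acc.reverse ++ l.map (fun c => if c = a then b else c) := by
  induction fuel generalizing l acc with
  | zero =>
    have hl : l = [] := List.length_eq_zero_iff.mp (Nat.le_zero.mp h)
    subst hl
    rw [PySem.Chars.replace.go.eq_def]; simp
  | succ n ih =>
    rcases l with _ | ⟨c, t⟩
    · rw [PySem.Chars.replace.go.eq_def]; simp
    · rw [PySem.Chars.replace.go.eq_def]
      simp only []
      have ht : t.length ≤ n := by simp at h; omega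
      by_cases hc : c = a
      · subst hc
        rw [if_pos (by simp [List.isPrefixOf])]
        have hdrop : List.drop ([c] : List Char).length (c :: t) = t := by simp
        rw [hdrop, ih _ _ ht]
        simp
      · have hne : ¬ (([a] : List Char).isPrefixOf (c :: t) = true) := by
          simp [List.isPrefixOf]
          exact fun h' => hc h'.symm
        rw [if_neg hne, ih _ _ ht]
        simp [hc]

theorem pvReplaceOne_eq (a b : Char) (l : List Char) :
    PySem.Chars.replace l [a] [b] = l.map (fun c => if c = a then b else c) := by
  rw [PySem.Chars.replace]
  simp only [List.isEmpty_cons, Bool.false_eq_true, if_false]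
  simpa using pvReplaceOneGo_eq a b l.length l [] le_rfl

-- squeeze on a cons with non-'_' head
theorem pvSqueeze_cons_ne (c : Char) (l : List Char) (h : c ≠ '_') :
    pvSqueeze (c :: l) = c :: pvSqueeze l := by
  rcases l with _ | ⟨d, t⟩
  · simp [pvSqueeze]
  · simp [pvSqueeze, h]

-- a string without "__" is a fixpoint of squeeze
theorem pvSqueeze_of_not_infix (l : List Char) (h : ¬ ['_', '_'] <:+: l) :
    pvSqueeze l = l := by
  induction l using pvSqueeze.induct with
  | case1 => simp [pvSqueeze]
  | case2 c => simp [pvSqueeze]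
  | case3 c d t hcd ih =>
    exfalso
    exact h (by obtain ⟨h1, h2⟩ := hcd; subst h1; subst h2; exact ⟨[], t, by simp⟩)
  | case4 c d t hcd ih =>
    have h' : ¬ ['_', '_'] <:+: d :: t := fun hi => h (List.infix_cons_iff.mpr (Or.inr hi))
    simp only [pvSqueeze, if_neg hcd]
    rw [ih h']

-- one replace("__","_") pass does not change the squeezed value
theorem pvSqueeze_rep1 (l : List Char) :
    pvSqueeze (pvRep1 l) = pvSqueeze l ∧ pvSqueeze ('_' :: pvRep1 l) = pvSqueeze ('_' :: l) := by
  induction l using pvRep1.induct with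
  | case1 => simp [pvRep1]
  | case2 c => simp [pvRep1]
  | case3 c d t hcd ih =>
    obtain ⟨rfl, rfl⟩ := hcd
    have e1 : pvRep1 ('_' :: '_' :: t) = '_' :: pvRep1 t := by simp [pvRep1]
    have e2 : pvSqueeze ('_' :: '_' :: t) = pvSqueeze ('_' :: t) := by simp [pvSqueeze]
    constructor
    · rw [e1, e2]; exact ih.2
    · rw [e1]
      have e3 : pvSqueeze ('_' :: '_' :: pvRep1 t) = pvSqueeze ('_' :: pvRep1 t) := by simp [pvSqueeze]
      have e4 : pvSqueeze ('_' :: '_' :: '_' :: t) = pvSqueeze ('_' :: '_' :: t) := by simp [pvSqueeze]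
      rw [e3, e4, e2]; exact ih.2
  | case4 c d t hcd ih =>
    have e1 : pvRep1 (c :: d :: t) = c :: pvRep1 (d :: t) := by simp [pvRep1, hcd]
    constructor
    · rw [e1]
      by_cases hc : c = '_'
      · subst hc; exact ih.2
      · rw [pvSqueeze_cons_ne c _ hc, pvSqueeze_cons_ne c _ hc, ih.1]
    · rw [e1]
      by_cases hc : c = '_'
      · subst hc
        have e3 : pvSqueeze ('_' :: '_' :: pvRep1 (d :: t)) = pvSqueeze ('_' :: pvRep1 (d :: t)) := by
          simp [pvSqueeze]
        have e4 : pvSqueeze ('_' :: '_' :: d :: t) = pvSqueeze ('_' :: d :: t) := by simp [pvSqueeze]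
        rw [e3, e4]; exact ih.2
      · have e3 : ∀ X, pvSqueeze ('_' :: c :: X) = '_' :: pvSqueeze (c :: X) := by
          intro X; simp [pvSqueeze, hc]
        rw [e3, e3, pvSqueeze_cons_ne c _ hc, pvSqueeze_cons_ne c _ hc, ih.1]

theorem pvAWhile_toList (s : String) : (pvAWhile s).toList = pvSqueeze s.toList := by
  induction s using pvAWhile.induct with
  | case1 s hin ih =>
    rw [pvAWhile, if_pos hin]
    rw [ih, PySem.Str.toList_replace]
    have h2 : ("__" : String).toList = ['_', '_'] := rfl
    have h3 : ("_" : String).toList = ['_'] := rfl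
    rw [h2, h3, pvReplace_eq]
    exact (pvSqueeze_rep1 s.toList).1
  | case2 s hin =>
    rw [pvAWhile, if_neg hin]
    have h' : ¬ ['_', '_'] <:+: s.toList := by
      intro hinf
      apply hin
      rw [PySem.Str.isIn_eq]
      have h2 : ("__" : String).toList = ['_', '_'] := rfl
      rw [h2]
      exact (PySem.Chars.isIn_iff_infix _ _).mpr hinf
    exact (pvSqueeze_of_not_infix _ h').symm

theorem pvCont_eq_squeeze (u : List Char) :
    ('_' :: pvCont '_' u = pvSqueeze ('_' :: u)) ∧ (∀ p, p ≠ '_' → pvCont p u = pvSqueeze u) := by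
  induction u with
  | nil => exact ⟨by simp [pvCont, pvSqueeze], fun p hp => by simp [pvCont, pvSqueeze]⟩
  | cons ch u ih =>
    refine ⟨?_, ?_⟩
    · by_cases hch : ch = '_'
      · subst hch
        have l1 : pvCont '_' ('_' :: u) = pvCont '_' u := by simp [pvCont]
        have l2 : pvSqueeze ('_' :: '_' :: u) = pvSqueeze ('_' :: u) := by simp [pvSqueeze]
        rw [l1, l2]; exact ih.1
      · have l1 : pvCont '_' (ch :: u) = ch :: pvCont ch u := by simp [pvCont, hch]
        have l2 : pvSqueeze ('_' :: ch :: u) = '_' :: pvSqueeze (ch :: u) := by simp [pvSqueeze, hch]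
        rw [l1, l2, pvSqueeze_cons_ne ch u hch, ih.2 ch hch]
    · intro p hp
      by_cases hch : ch = '_'
      · subst hch
        have l1 : pvCont p ('_' :: u) = '_' :: pvCont '_' u := by simp [pvCont, hp]
        rw [l1]; exact ih.1
      · have l1 : pvCont p (ch :: u) = ch :: pvCont ch u := by simp [pvCont, hch]
        rw [l1, pvSqueeze_cons_ne ch u hch, ih.2 ch hch]

theorem pvMem_underscore (ch : Char) (hm : ch ∈ (['-', '_', ' ', '/', '.'] : List Char)) :
    (if ch ∈ (['-', ' ', '/', '.'] : List Char) then '_' else ch) = '_' := by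
  simp only [List.mem_cons, List.not_mem_nil, or_false] at hm
  rcases hm with rfl | rfl | rfl | rfl | rfl <;> decide

theorem pvNotMem (ch : Char) (hm : ch ∉ (['-', '_', ' ', '/', '.'] : List Char)) :
    (if ch ∈ (['-', ' ', '/', '.'] : List Char) then '_' else ch) = ch ∧ ch ≠ '_' := by
  simp only [List.mem_cons, List.not_mem_nil, or_false, not_or] at hm
  obtain ⟨h1, h2, h3, h4, h5⟩ := hm
  refine ⟨?_, h2⟩
  rw [if_neg]
  simp [List.mem_cons, h1, h3, h4, h5]

theorem pvFoldB_cont (u : List Char) : ∀ (r : List Char) (p : Char),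
    u.foldl pvStepB (r ++ [p]) = (r ++ [p]) ++ pvCont p (pvMapSep u) := by
  induction u with
  | nil => intro r p; simp [pvMapSep, pvCont]
  | cons ch u ih =>
    intro r p
    rw [List.foldl_cons]
    have hms : pvMapSep (ch :: u) = (if ch ∈ (['-', ' ', '/', '.'] : List Char) then '_' else ch) :: pvMapSep u := by
      simp [pvMapSep]
    by_cases hm : ch ∈ (['-', '_', ' ', '/', '.'] : List Char)
    · have hf := pvMem_underscore ch hm
      by_cases hp : p = '_'
      · subst hp
        have hstep : pvStepB (r ++ ['_']) ch = r ++ ['_'] := by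
          simp [pvStepB, hm]
        rw [hstep, ih r '_', hms, hf]
        have l1 : pvCont '_' ('_' :: pvMapSep u) = pvCont '_' (pvMapSep u) := by simp [pvCont]
        rw [l1]
      · have hstep : pvStepB (r ++ [p]) ch = (r ++ [p]) ++ ['_'] := by
          simp [pvStepB, hm, hp]
        rw [hstep, ih (r ++ [p]) '_', hms, hf]
        have l1 : pvCont p ('_' :: pvMapSep u) = '_' :: pvCont '_' (pvMapSep u) := by simp [pvCont, hp]
        rw [l1]
        simp [List.append_assoc]
    · obtain ⟨hf, hch⟩ := pvNotMem ch hm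
      have hstep : pvStepB (r ++ [p]) ch = (r ++ [p]) ++ [ch] := by simp [pvStepB, hm]
      rw [hstep, ih (r ++ [p]) ch, hms, hf]
      have l1 : pvCont p (ch :: pvMapSep u) = ch :: pvCont ch (pvMapSep u) := by simp [pvCont, hch]
      rw [l1]
      simp [List.append_assoc]

theorem pvFoldB_eq (u : List Char) :
    u.foldl pvStepB [] = pvSqueeze ((pvMapSep u).dropWhile (fun c => c = '_')) := by
  induction u with
  | nil => simp [pvMapSep, pvSqueeze]
  | cons ch u ih =>
    rw [List.foldl_cons]
    have hms : pvMapSep (ch :: u) = (if ch ∈ (['-', ' ', '/', '.'] : List Char) then '_' else ch) :: pvMapSep u := by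
      simp [pvMapSep]
    by_cases hm : ch ∈ (['-', '_', ' ', '/', '.'] : List Char)
    · have hstep : pvStepB [] ch = [] := by simp [pvStepB, hm]
      rw [hstep, ih, hms, pvMem_underscore ch hm]
      have l1 : List.dropWhile (fun c => c = '_') ('_' :: pvMapSep u) = List.dropWhile (fun c => c = '_') (pvMapSep u) := by
        simp
      rw [l1]
    · obtain ⟨hf, hch⟩ := pvNotMem ch hm
      have hstep : pvStepB [] ch = [ch] := by simp [pvStepB, hm]
      rw [hstep]
      have h2 : u.foldl pvStepB [ch] = [ch] ++ pvCont ch (pvMapSep u) := by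
        simpa using pvFoldB_cont u [] ch
      rw [h2, (pvCont_eq_squeeze (pvMapSep u)).2 ch hch, hms, hf]
      have l1 : List.dropWhile (fun c => c = '_') (ch :: pvMapSep u) = ch :: pvMapSep u := by
        simp [hch]
      rw [l1, pvSqueeze_cons_ne ch _ hch]
      rfl

theorem pvDropWhile_squeeze (u : List Char) :
    (pvSqueeze u).dropWhile (fun c => c = '_') = pvSqueeze (u.dropWhile (fun c => c = '_')) := by
  induction u using pvSqueeze.induct with
  | case1 => simp [pvSqueeze]
  | case2 c =>
    by_cases hc : c = '_'
    · subst hc; simp [pvSqueeze]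
    · simp [pvSqueeze, hc]
  | case3 c d t hcd ih =>
    obtain ⟨rfl, rfl⟩ := hcd
    have e : pvSqueeze ('_' :: '_' :: t) = pvSqueeze ('_' :: t) := by simp [pvSqueeze]
    rw [e, ih]
    have l1 : List.dropWhile (fun c => c = '_') ('_' :: '_' :: t) = List.dropWhile (fun c => c = '_') ('_' :: t) := by
      simp
    rw [l1]
  | case4 c d t hcd ih =>
    by_cases hc : c = '_'
    · subst hc
      have hd : d ≠ '_' := fun h => hcd ⟨rfl, h⟩
      have e : pvSqueeze ('_' :: d :: t) = '_' :: pvSqueeze (d :: t) := by simp [pvSqueeze, hd]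
      rw [e]
      have l1 : List.dropWhile (fun c => c = '_') ('_' :: pvSqueeze (d :: t)) = List.dropWhile (fun c => c = '_') (pvSqueeze (d :: t)) := by
        simp
      have l2 : List.dropWhile (fun c => c = '_') ('_' :: d :: t) = List.dropWhile (fun c => c = '_') (d :: t) := by
        simp
      rw [l1, l2, ih]
    · have e : pvSqueeze (c :: d :: t) = c :: pvSqueeze (d :: t) := by simp [pvSqueeze, hcd]
      rw [e]
      have l1 : List.dropWhile (fun x => x = '_') (c :: pvSqueeze (d :: t)) = c :: pvSqueeze (d :: t) := by
        simp [hc]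
      have l2 : List.dropWhile (fun x => x = '_') (c :: d :: t) = c :: d :: t := by
        simp [hc]
      rw [l1, l2, e]

theorem pvDropWhile_idem (p : Char → Bool) (l : List Char) :
    (l.dropWhile p).dropWhile p = l.dropWhile p := by
  induction l with
  | nil => simp
  | cons a l ih =>
    by_cases hp : p a
    · simp [hp, ih]
    · simp [hp]

-- ===== VERDICT (by name: the statement is the Claim_ definition above) =====
theorem normalize_status_token_py_spec : Claim_equal_normalize_status_token_py := by
  intro value _hd
  unfold Spec_normalize_status_token_py normalize_status_token_py normalize_status_token_py_alt
  by_cases h : PySem.Str.lower (PySem.Str.strip (value.getD "")) = ""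
  · simp [h]
  · simp only [if_neg h]
    apply String.toList_inj.mp
    rw [PySem.Str.toList_stripChars, PySem.Str.toList_stripChars]
    rw [pvAWhile_toList]
    have hA : ((["-", " ", "/", "."].foldl (fun t sep => PySem.Str.replace t sep "_")
        (PySem.Str.lower (PySem.Str.strip (value.getD ""))))).toList
        = pvMapSep (PySem.Str.lower (PySem.Str.strip (value.getD ""))).toList := by
      simp only [List.foldl_cons, List.foldl_nil]
      rw [PySem.Str.toList_replace, PySem.Str.toList_replace, PySem.Str.toList_replace, PySem.Str.toList_replace]
      have d1 : ("-" : String).toList = ['-'] := rfl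
      have d2 : (" " : String).toList = [' '] := rfl
      have d3 : ("/" : String).toList = ['/'] := rfl
      have d4 : ("." : String).toList = ['.'] := rfl
      have du : ("_" : String).toList = ['_'] := rfl
      simp only [d1, d2, d3, d4, du]
      rw [pvReplaceOne_eq, pvReplaceOne_eq, pvReplaceOne_eq, pvReplaceOne_eq]
      rw [List.map_map, List.map_map, List.map_map]
      unfold pvMapSep
      apply List.map_congr_left
      intro a _
      simp only [Function.comp]
      by_cases hm : a ∈ (['-', ' ', '/', '.'] : List Char)
      · simp only [List.mem_cons, List.not_mem_nil, or_false] at hm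
        rcases hm with rfl | rfl | rfl | rfl <;> decide
      · simp only [List.mem_cons, List.not_mem_nil, or_false, not_or] at hm
        obtain ⟨h1, h2, h3, h4⟩ := hm
        rw [if_neg h1, if_neg h2, if_neg h3, if_neg h4, if_neg]
        simp [List.mem_cons, h1, h2, h3, h4]
    rw [hA]
    have hB : (String.ofList ((PySem.Str.lower (PySem.Str.strip (value.getD ""))).toList.foldl pvStepB [])).toList
        = (PySem.Str.lower (PySem.Str.strip (value.getD ""))).toList.foldl pvStepB [] := by
      simp
    rw [hB, pvFoldB_eq]
    rw [show ("_" : String).toList = ['_'] from rfl]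
    simp only [PySem.Chars.stripChars]
    have hpq : (fun c => (['_'] : List Char).contains c) = (fun c : Char => decide (c = '_')) := by
      funext c
      by_cases hc : c = '_' <;> simp [hc]
    rw [hpq]
    rw [pvDropWhile_squeeze, pvDropWhile_squeeze, pvDropWhile_idem]
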